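-- pv_equiv track=rewrite | github.com/SPRAINT890/programacion-I | Practico 4.2/ejercicio17_4.2.py | separador_fecha
-- ===== SOURCE A (Python) =====
-- def separador_fecha(fecha):
--     dia = []
--     mes = []
--     año = []
--     diagonales = 0
--     for c in fecha:
--         if c != "/":
--             if diagonales == 0:
--                 dia.append(c)
--             elif diagonales == 1:
--                 mes.append(c)
--             elif diagonales == 2:
--                 año.append(c)
--         else:
--             diagonales += 1
--     return dia, mes, año
-- ===== SOURCE B (Python) =====
-- def separador_fecha(fecha):
--     parts = fecha.split("/")
--     dia = list(parts[0])
--     mes = list(parts[1]) if len(parts) > 1 else []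
--     a_o = list(parts[2]) if len(parts) > 2 else []
--     return dia, mes, a_o
-- ===== Notes on version B (the rewrite author's own statement) =====
-- stated objective: idiomatic
-- what changed: Replaced the manual character scan with a slash counter and three conditional appends by a single str.split('/') followed by indexed list() conversions of the first three parts.
import Mathlib
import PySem

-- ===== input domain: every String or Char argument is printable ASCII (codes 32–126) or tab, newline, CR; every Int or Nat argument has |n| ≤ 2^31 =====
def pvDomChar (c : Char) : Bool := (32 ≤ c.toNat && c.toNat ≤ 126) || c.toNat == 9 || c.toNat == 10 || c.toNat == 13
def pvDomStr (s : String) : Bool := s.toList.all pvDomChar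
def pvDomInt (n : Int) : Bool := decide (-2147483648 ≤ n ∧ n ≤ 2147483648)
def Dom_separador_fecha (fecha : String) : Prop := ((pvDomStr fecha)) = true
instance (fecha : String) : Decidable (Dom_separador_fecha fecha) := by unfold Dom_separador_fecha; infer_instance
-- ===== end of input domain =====

-- B replaces A's manual slash-counting character scan by a split('/') plus indexed list() conversions (idiomatic, same cost).

-- ===== PORT A =====
-- the for-loop over fecha with state (dia, mes, año, diagonales); Python's 1-char strings appended become singleton Strings
def separadorFechaLoop : List Char → List String → List String → List String → Nat →
    List String × List String × List String
  | [], dia, mes, año, _ => (dia, mes, año)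
  | c :: rest, dia, mes, año, d =>
    if c ≠ '/' then
      if d = 0 then separadorFechaLoop rest (dia ++ [String.ofList [c]]) mes año d
      else if d = 1 then separadorFechaLoop rest dia (mes ++ [String.ofList [c]]) año d
      else if d = 2 then separadorFechaLoop rest dia mes (año ++ [String.ofList [c]]) d
      else separadorFechaLoop rest dia mes año d
    else separadorFechaLoop rest dia mes año (d + 1)

def separador_fecha (fecha : String) : List String × List String × List String :=
  separadorFechaLoop fecha.toList [] [] [] 0

-- ===== PORT B =====
def separador_fecha_alt (fecha : String) : List String × List String × List String :=
  match PySem.Str.split? fecha "/" with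
  | some parts =>
    ( (parts.getD 0 "").toList.map (fun c => String.ofList [c]),
      if parts.length > 1 then (parts.getD 1 "").toList.map (fun c => String.ofList [c]) else [],
      if parts.length > 2 then (parts.getD 2 "").toList.map (fun c => String.ofList [c]) else [] )
  | none => ([], [], [])  -- unreachable: the separator "/" is nonempty

-- ===== PRECONDITION & SPEC =====
def Spec_separador_fecha (fecha : String) (out : List String × List String × List String) : Prop := out = separador_fecha_alt fecha
instance (fecha : String) (out : List String × List String × List String) : Decidable (Spec_separador_fecha fecha out) := by unfold Spec_separador_fecha; infer_instance

-- ===== CLAIM (what is proved, stated in full; the proofs are below) =====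
def Claim_equal_separador_fecha : Prop := ∀ (fecha : String), Dom_separador_fecha fecha → Spec_separador_fecha fecha (separador_fecha fecha)

-- ===== LEMMAS AND PROOFS =====

-- reference: split a char list on '/'
def mySplit : List Char → List (List Char)
  | [] => [[]]
  | c :: rest =>
    if c = '/' then [] :: mySplit rest
    else
      match mySplit rest with
      | p :: ps => (c :: p) :: ps
      | [] => [[c]]

theorem mySplit_ne_nil (l : List Char) : mySplit l ≠ [] := by
  cases l with
  | nil => simp [mySplit]
  | cons c rest =>
    simp only [mySplit]
    split
    · simp
    · cases h : mySplit rest <;> simp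

theorem splitOn_go_single (l : List Char) : ∀ (fuel : Nat) (cur : List Char)
    (acc : List (List Char)), l.length ≤ fuel →
    PySem.Chars.splitOn.go ['/'] fuel l cur acc =
      acc.reverse ++ ((cur.reverse ++ (mySplit l).headD []) :: (mySplit l).tail) := by
  induction l with
  | nil =>
    intro fuel cur acc _
    cases fuel <;> simp [PySem.Chars.splitOn.go, mySplit]
  | cons c rest ih =>
    intro fuel cur acc hf
    cases fuel with
    | zero => simp at hf
    | succ f =>
      by_cases hc : c = '/'
      · subst hc
        simp only [PySem.Chars.splitOn.go, List.isPrefixOf, beq_self_eq_true, Bool.true_and, if_true]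
        rw [show List.drop ['/'].length ('/' :: rest) = rest from rfl,
          ih f [] (cur.reverse :: acc) (by simpa using Nat.lt_succ_iff.mp (by simpa using hf))]
        obtain ⟨p, ps, hr⟩ : ∃ p ps, mySplit rest = p :: ps := by
          cases h : mySplit rest with
          | nil => exact absurd h (mySplit_ne_nil rest)
          | cons p ps => exact ⟨p, ps, rfl⟩
        simp [mySplit, hr]
      · have hpre : (['/'].isPrefixOf (c :: rest)) = false := by
          simp [List.isPrefixOf]
          exact fun h => hc h.symm
        simp only [PySem.Chars.splitOn.go, hpre, Bool.false_eq_true, if_false]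
        rw [ih f (c :: cur) acc (by simpa using Nat.lt_succ_iff.mp (by simpa using hf))]
        have hne := mySplit_ne_nil rest
        cases hrest : mySplit rest with
        | nil => exact absurd hrest hne
        | cons p ps => simp [mySplit, hc, hrest]

theorem splitOn_eq_mySplit (l : List Char) :
    PySem.Chars.splitOn l ['/'] = mySplit l := by
  unfold PySem.Chars.splitOn
  rw [splitOn_go_single l (l.length + 1) [] [] (by omega)]
  have hne := mySplit_ne_nil l
  cases h : mySplit l with
  | nil => exact absurd h hne
  | cons p ps => simp

-- closed form of A's loop in terms of mySplit, for every accumulator state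
theorem loop_eq (l : List Char) : ∀ (dia mes año : List String) (d : Nat),
    separadorFechaLoop l dia mes año d =
      ( dia ++ (if d = 0 then ((mySplit l).getD 0 []).map (fun c => String.ofList [c]) else []),
        mes ++ (if d = 0 then ((mySplit l).getD 1 []).map (fun c => String.ofList [c])
                else if d = 1 then ((mySplit l).getD 0 []).map (fun c => String.ofList [c]) else []),
        año ++ (if d = 0 then ((mySplit l).getD 2 []).map (fun c => String.ofList [c])
                else if d = 1 then ((mySplit l).getD 1 []).map (fun c => String.ofList [c])
                else if d = 2 then ((mySplit l).getD 0 []).map (fun c => String.ofList [c]) else []) ) := by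
  induction l with
  | nil =>
    intro dia mes año d
    simp only [separadorFechaLoop, mySplit]
    split_ifs <;> simp [List.getD]
  | cons c rest ih =>
    intro dia mes año d
    by_cases hc : c = '/'
    · subst hc
      simp only [separadorFechaLoop, ne_eq, not_true_eq_false, if_false, ih]
      have h : mySplit ('/' :: rest) = [] :: mySplit rest := by simp [mySplit]
      rcases em (d = 0) with h0 | h0 <;> rcases em (d = 1) with h1 | h1 <;>
        rcases em (d = 2) with h2 | h2 <;> first | omega | simp [h, h0, h1, h2]
    · have h : ∃ p ps, mySplit rest = p :: ps ∧ mySplit (c :: rest) = (c :: p) :: ps := by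
        cases hrest : mySplit rest with
        | nil => exact absurd hrest (mySplit_ne_nil rest)
        | cons p ps => exact ⟨p, ps, rfl, by simp [mySplit, hc, hrest]⟩
      obtain ⟨p, ps, hr, hcr⟩ := h
      simp only [separadorFechaLoop, ne_eq, hc, not_false_eq_true, if_true, ih, hr, hcr]
      rcases em (d = 0) with h0 | h0 <;> rcases em (d = 1) with h1 | h1 <;>
        rcases em (d = 2) with h2 | h2 <;> first | omega | simp [h0, h1, h2]

theorem getD_map_ofList (xs : List (List Char)) (i : Nat) :
    ((xs.map String.ofList).getD i "").toList = xs.getD i [] := by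
  rcases lt_or_ge i xs.length with h | h
  · simp [List.getD, h]
  · rw [List.getD_eq_default, List.getD_eq_default] <;> simp [h]

theorem getD_of_len_le (xs : List (List Char)) (i : Nat) (h : xs.length ≤ i) :
    xs.getD i [] = [] := List.getD_eq_default _ _ (by omega)

-- ===== VERDICT (by name: the statement is the Claim_ definition above) =====
theorem separador_fecha_spec : Claim_equal_separador_fecha := by
  intro fecha _
  unfold Spec_separador_fecha separador_fecha separador_fecha_alt
  have hsplit : PySem.Str.split? fecha "/" =
      some ((mySplit fecha.toList).map String.ofList) := by
    simp [PySem.Str.split?, PySem.Chars.split?, splitOn_eq_mySplit]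
  rw [hsplit]
  simp only [loop_eq, if_true, List.nil_append, List.length_map, getD_map_ofList]
  simp only [Prod.mk.injEq]
  refine ⟨?_, ?_, ?_⟩
  · first | rfl | trivial
  · split_ifs with h
    · rfl
    · rw [getD_of_len_le _ _ (by omega)]; rfl
  · split_ifs with h
    · rfl
    · rw [getD_of_len_le _ _ (by omega)]; rfl
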